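-- pv_equiv track=rewrite | github.com/JoDongHyuen/Baekjoon | 백준(Python)/Problem2554.py | solution
-- ===== SOURCE A (Python) =====
-- digit = [1, 1, 2, 6, 4, 2, 2, 4, 2, 8]
--
-- def solution(N):
--     if N < 10:
--         return digit[N]
--     else:
--         if (N // 10) % 2 == 0:
--             return (6 * solution(N//5) * solution(N % 10)) % 10
--         else:
--             return (5 * solution(N//5) * solution(N % 10)) % 10
-- ===== SOURCE B (Python) =====
-- digit = [1, 1, 2, 6, 4, 2, 2, 4, 2, 8]
--
-- def solution(N):
--     # iterative: accumulate the factor chain of the recurrence, reduce mod 10 once at the end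
--     result = 1
--     while N >= 10:
--         c = 6 if (N // 10) % 2 == 0 else 5
--         result *= c * digit[N % 10]
--         N //= 5
--     return (result * digit[N]) % 10
-- ===== Notes on version B (the rewrite author's own statement) =====
-- stated objective: alternative
-- what changed: replaces the branching recursion (with a mod-10 reduction at every level) by a single while loop that accumulates the product of factors and reduces mod 10 once at the end
import Mathlib
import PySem

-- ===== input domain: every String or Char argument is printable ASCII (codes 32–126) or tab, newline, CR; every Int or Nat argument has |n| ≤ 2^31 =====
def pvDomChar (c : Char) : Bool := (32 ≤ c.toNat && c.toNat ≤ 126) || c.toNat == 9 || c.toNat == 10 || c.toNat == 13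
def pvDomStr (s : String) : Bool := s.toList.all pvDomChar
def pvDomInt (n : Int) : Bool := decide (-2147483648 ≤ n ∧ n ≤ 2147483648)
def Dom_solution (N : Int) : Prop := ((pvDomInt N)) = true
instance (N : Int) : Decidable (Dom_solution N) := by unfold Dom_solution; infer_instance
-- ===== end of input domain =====

-- B replaces A's branching recursion by an iterative accumulator loop that reduces mod 10 once at the end (alternative decomposition, same cost).


-- ===== PORT A =====
def digitTbl : List Int := [1, 1, 2, 6, 4, 2, 2, 4, 2, 8]

-- fuel is only a totality guard (each recursive call strictly shrinks N); fuel = N.toNat + 1 is always enough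
def solutionFuel : Nat → Int → Int
  | 0, _ => 0
  | fuel + 1, N =>
    if N < 10 then (PySem.List.pyGet? digitTbl N).getD 0
    else
      if PySem.Int.mod (PySem.Int.floordiv N 10) 2 = 0 then
        PySem.Int.mod (6 * solutionFuel fuel (PySem.Int.floordiv N 5) * solutionFuel fuel (PySem.Int.mod N 10)) 10
      else
        PySem.Int.mod (5 * solutionFuel fuel (PySem.Int.floordiv N 5) * solutionFuel fuel (PySem.Int.mod N 10)) 10

def solution (N : Int) : Int := solutionFuel (N.toNat + 1) N

-- ===== PORT B =====
-- the while loop of Source B, state (N, result); fuel is only a totality guard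
def solLoopFuel : Nat → Int → Int → Int
  | 0, _, result => result
  | fuel + 1, N, result =>
    if 10 ≤ N then
      let c : Int := if PySem.Int.mod (PySem.Int.floordiv N 10) 2 = 0 then 6 else 5
      solLoopFuel fuel (PySem.Int.floordiv N 5)
        (result * (c * (PySem.List.pyGet? digitTbl (PySem.Int.mod N 10)).getD 0))
    else
      PySem.Int.mod (result * (PySem.List.pyGet? digitTbl N).getD 0) 10

def solution_alt (N : Int) : Int := solLoopFuel (N.toNat + 1) N 1

-- ===== PRECONDITION & SPEC =====
-- Pre_ excludes exactly the inputs N < -10, on which Python A raises IndexError (digit[N]); B raises there too.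
def Pre_solution (N : Int) : Prop := -10 ≤ N
instance (N : Int) : Decidable (Pre_solution N) := by unfold Pre_solution; infer_instance
def pvWitness_solution : Int := 12

def Spec_solution (N : Int) (out : Int) : Prop := out = solution_alt N
instance (N : Int) (out : Int) : Decidable (Spec_solution N out) := by unfold Spec_solution; infer_instance

-- ===== CLAIM (what is proved, stated in full; the proofs are below) =====
def Claim_equal_solution : Prop := ∀ (N : Int), Dom_solution N → Pre_solution N → Spec_solution N (solution N)

-- ===== LEMMAS AND PROOFS =====

-- base-case values of the table lookup lie in [0, 9]
theorem digit_bounds (N : Int) (h1 : -10 ≤ N) (h2 : N < 10) :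
    0 ≤ ((PySem.List.pyGet? digitTbl N).getD 0) ∧ ((PySem.List.pyGet? digitTbl N).getD 0) < 10 := by
  interval_cases N <;> decide

theorem solutionFuel_bounds (fuel : Nat) (N : Int) (h : -10 ≤ N) (hf : N.toNat < fuel) :
    0 ≤ solutionFuel fuel N ∧ solutionFuel fuel N < 10 := by
  cases fuel with
  | zero => omega
  | succ fuel =>
    rw [solutionFuel]
    split
    · exact digit_bounds N h (by omega)
    · split <;>
      exact ⟨PySem.Int.mod_nonneg _ (by omega), PySem.Int.mod_lt _ (by omega)⟩

theorem abs_emod (r x : Int) : (r * (x % 10)) % 10 = (r * x) % 10 := by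
  rw [Int.mul_emod, Int.emod_emod_of_dvd _ dvd_rfl, ← Int.mul_emod]

-- on a base-case argument, solutionFuel is just the table lookup (any positive fuel)
theorem solutionFuel_base (fuel : Nat) (N : Int) (h : N < 10) :
    solutionFuel (fuel + 1) N = (PySem.List.pyGet? digitTbl N).getD 0 := by
  rw [solutionFuel]; simp [h]

-- loop invariant: with enough fuel, the loop computes (result * solution N) % 10
theorem solLoopFuel_eq (fuel : Nat) (N r : Int) (h : -10 ≤ N) (hf : N.toNat < fuel) :
    solLoopFuel fuel N r = PySem.Int.mod (r * solutionFuel fuel N) 10 := by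
  induction fuel generalizing N r with
  | zero => omega
  | succ fuel ih =>
    rw [solLoopFuel]
    split
    case isFalse h10 =>
      rw [solutionFuel_base fuel N (by omega)]
    case isTrue h10 =>
      have hdiv5 : PySem.Int.floordiv N 5 = N / 5 :=
        PySem.Int.floordiv_eq_ediv_of_pos (by omega)
      have hmod10 : PySem.Int.mod N 10 = N % 10 := PySem.Int.mod_eq_emod_of_pos (by omega)
      have hd : -10 ≤ PySem.Int.floordiv N 5 ∧ (PySem.Int.floordiv N 5).toNat < fuel := by
        rw [hdiv5]; omega
      rw [ih (PySem.Int.floordiv N 5) _ hd.1 hd.2]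
      conv_rhs => rw [solutionFuel]
      rw [if_neg (by omega : ¬ N < 10)]
      obtain ⟨fuel', rfl⟩ : ∃ fuel', fuel = fuel' + 1 := ⟨fuel - 1, by omega⟩
      rw [solutionFuel_base fuel' (PySem.Int.mod N 10) (by rw [hmod10]; omega)]
      simp only [PySem.Int.mod_eq_emod_of_pos (by omega : (0:Int) < 10)]
      split <;> (rw [abs_emod]; ring_nf)

-- ===== VERDICT (by name: the statement is the Claim_ definition above) =====
theorem solution_spec : Claim_equal_solution := by
  intro N _ hpre
  unfold Spec_solution solution_alt solution
  rw [solLoopFuel_eq (N.toNat + 1) N 1 hpre (by omega), one_mul]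
  have := solutionFuel_bounds (N.toNat + 1) N hpre (by omega)
  rw [PySem.Int.mod_eq_emod_of_pos (by omega : (0:Int) < 10)]
  omega
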